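-- pv_equiv track=rewrite | github.com/MistakenPirate/cd_practice | dfa_q_s.py | classify_text
-- ===== SOURCE A (Python) =====
-- def classify_text(text):
--     state = 'q1'  # Initial state
--
--     for char in text:
--         if state == 'q1':  # In the middle of processing
--             if char == '?':  # Question mark detected
--                 state = 'q2'
--             elif char == '.':  # Period detected
--                 state = 'q3'
--             else:
--                 state = 'q1'  # Stay in q1 for any other characters
--
--         elif state == 'q2':  # After '?' (valid question)
--             return "Question"  # It's a question if it ends in '?'
--
--         elif state == 'q3':  # After '.' (valid statement)
--             return "Statement"  # It's a statement if it ends in '.'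
--
--         elif state == 'q4':  # Dead state (invalid input)
--             return "Invalid"  # Invalid input
--
--     # Final check: text must end with either '.' or '?'
--     if state == 'q2':
--         return "Question"
--     elif state == 'q3':
--         return "Statement"
--     else:
--         return "Invalid"
-- ===== SOURCE B (Python) =====
-- def classify_text(text):
--     # Direct scan: the first '?' or '.' decides; no state machine.
--     for char in text:
--         if char == '?':
--             return "Question"
--         if char == '.':
--             return "Statement"
--     return "Invalid"
-- ===== Notes on version B (the rewrite author's own statement) =====
-- stated objective: simpler
-- what changed: Replaced the explicit DFA state variable and deferred-by-one-iteration returns with a direct character scan that returns immediately on the first '?' or '.'.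
import Mathlib
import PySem

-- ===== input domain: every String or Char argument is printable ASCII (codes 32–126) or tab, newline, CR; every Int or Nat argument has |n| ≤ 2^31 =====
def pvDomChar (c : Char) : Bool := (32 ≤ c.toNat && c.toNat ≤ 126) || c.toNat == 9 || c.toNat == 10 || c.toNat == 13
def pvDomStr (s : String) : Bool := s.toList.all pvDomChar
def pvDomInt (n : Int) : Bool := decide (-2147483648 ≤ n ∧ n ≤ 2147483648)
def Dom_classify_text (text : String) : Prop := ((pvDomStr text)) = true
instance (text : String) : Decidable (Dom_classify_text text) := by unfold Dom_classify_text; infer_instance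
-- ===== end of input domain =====

-- B drops A's DFA state variable for a direct scan returning on the first '?' or '.'; objective: simpler.

-- ===== PORT A =====
-- literal port of A's loop: the DFA state is carried as the same string values
def classify_text_go : List Char → String → String
  | [], st => if st = "q2" then "Question" else if st = "q3" then "Statement" else "Invalid"
  | c :: cs, st =>
    if st = "q1" then
      classify_text_go cs (if c = '?' then "q2" else if c = '.' then "q3" else "q1")
    else if st = "q2" then "Question"
    else if st = "q3" then "Statement"
    else if st = "q4" then "Invalid"
    else classify_text_go cs st

def classify_text (text : String) : String :=
  classify_text_go text.toList "q1"

-- ===== PORT B =====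
def classify_text_alt_go : List Char → String
  | [] => "Invalid"
  | c :: cs =>
    if c = '?' then "Question"
    else if c = '.' then "Statement"
    else classify_text_alt_go cs

def classify_text_alt (text : String) : String :=
  classify_text_alt_go text.toList

-- ===== PRECONDITION & SPEC =====
def Spec_classify_text (text : String) (out : String) : Prop := out = classify_text_alt text
instance (text : String) (out : String) : Decidable (Spec_classify_text text out) := by unfold Spec_classify_text; infer_instance

-- ===== CLAIM (what is proved, stated in full; the proofs are below) =====
def Claim_equal_classify_text : Prop := ∀ (text : String), Dom_classify_text text → Spec_classify_text text (classify_text text)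

-- ===== LEMMAS AND PROOFS =====
theorem go_q2 (cs : List Char) : classify_text_go cs "q2" = "Question" := by
  cases cs <;> simp [classify_text_go]

theorem go_q3 (cs : List Char) : classify_text_go cs "q3" = "Statement" := by
  cases cs <;> simp [classify_text_go]

theorem go_q1 (cs : List Char) : classify_text_go cs "q1" = classify_text_alt_go cs := by
  induction cs with
  | nil => simp [classify_text_go, classify_text_alt_go]
  | cons c cs ih =>
    simp only [classify_text_go, classify_text_alt_go, if_pos rfl]
    by_cases h? : c = '?'
    · simp [h?, go_q2]
    · by_cases hd : c = '.'
      · simp [h?, hd, go_q3]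
      · simp [h?, hd, ih]

-- ===== VERDICT (by name: the statement is the Claim_ definition above) =====
theorem classify_text_spec : Claim_equal_classify_text := by
  intro text _
  show classify_text text = classify_text_alt text
  simpa [classify_text, classify_text_alt] using go_q1 text.toList
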